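-- pv_equiv track=rewrite | github.com/242lee/Albamo | 이소희/240919Thur/프로그래머스_비트.py | solution
-- ===== SOURCE A (Python) =====
-- def solution(numbers):
--     answer = []
--     for num in numbers:
--         if num % 2 == 0:
--             answer.append(num + 1)
--         else:
--             bin_num = list('0' + bin(num)[2:])
--             # 가장 작은 값을 구해야 하므로 뒤에서부터
--             for i in range(len(bin_num) - 1, -1, -1):
--                 if bin_num[i] == '0':
--                     bin_num[i] = '1'
--                     if i + 1 < len(bin_num):
--                         bin_num[i + 1] = '0'
--                     break
--             answer.append(int(''.join(bin_num), 2))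
--     return answer
-- ===== SOURCE B (Python) =====
-- def _next(num):
--     if num % 2 == 0:
--         return num + 1
--     # odd: adding 1 turns the trailing block of 1s into a single 1 followed
--     # by zeros; half of that lowest set bit is exactly what must be added.
--     half = 1
--     m = (num + 1) // 2
--     while m % 2 == 0:
--         m //= 2
--         half *= 2
--     return num + half
--
--
-- def solution(numbers):
--     return [_next(num) for num in numbers]
-- ===== Notes on version B (the rewrite author's own statement) =====
-- stated objective: simpler
-- what changed: replaces A's binary-string construction and right-to-left character scan by pure arithmetic: for an odd num it halves (num+1)/2 until it is odd, which yields half of the lowest set bit of num+1, and adds it to num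
-- outside the precondition, e.g. on solution([-3]): A returns [11], B returns [-2]; on solution([-1]): A returns [5], B does not finish within the time limit
import Mathlib
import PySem

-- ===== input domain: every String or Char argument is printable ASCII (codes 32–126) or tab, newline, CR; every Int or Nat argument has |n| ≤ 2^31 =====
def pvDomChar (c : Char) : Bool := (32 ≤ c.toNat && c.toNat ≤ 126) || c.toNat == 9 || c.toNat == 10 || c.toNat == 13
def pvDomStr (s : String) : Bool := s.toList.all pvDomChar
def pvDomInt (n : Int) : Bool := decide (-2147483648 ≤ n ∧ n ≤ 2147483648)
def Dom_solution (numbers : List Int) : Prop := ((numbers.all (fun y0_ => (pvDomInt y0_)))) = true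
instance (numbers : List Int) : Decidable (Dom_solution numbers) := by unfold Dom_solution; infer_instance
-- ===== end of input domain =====

-- B replaces A's binary-string building and right-to-left character scan by a
-- purely arithmetic halving loop (objective: simpler, no string round-trip).

-- ===== PORT A =====

-- binary digits of a positive Nat, most significant first (bin(n)[2:] for n > 0)
def pvNatBits : Nat → List Char
  | 0 => []
  | n + 1 => pvNatBits ((n + 1) / 2) ++ [if (n + 1) % 2 = 1 then '1' else '0']
decreasing_by exact Nat.div_lt_self (Nat.succ_pos n) (by norm_num)

-- bin(num)[2:]  (bin gives '0b…' / '-0b…'; slicing drops the first two chars)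
def pvBinTail (num : Int) : List Char :=
  ((if num < 0 then ['-', '0', 'b'] else ['0', 'b']) ++
    (if num.natAbs = 0 then ['0'] else pvNatBits num.natAbs)).drop 2

-- the scan 'for i in range(len(bin_num)-1, -1, -1): …  break'; fuel = i+1
def pvScan (bs : List Char) : Nat → List Char
  | 0 => bs
  | i + 1 =>
    if bs.getD i ' ' = '0' then
      let bs1 := bs.set i '1'
      if i + 1 < bs1.length then bs1.set (i + 1) '0' else bs1
    else pvScan bs i

-- int(s, 2); exact on strings of '0'/'1' characters, which is all that is
-- reached inside Pre_solution (the odd branch then only sees num ≥ 1)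
def pvIntOfBin (cs : List Char) : Int :=
  cs.foldl (fun acc c => 2 * acc + (if c = '1' then 1 else 0)) 0

def solution (numbers : List Int) : List Int :=
  numbers.foldl
    (fun answer num =>
      if num % 2 = 0 then answer ++ [num + 1]
      else
        let binNum := '0' :: pvBinTail num
        let binNum := pvScan binNum binNum.length
        answer ++ [pvIntOfBin binNum])
    []

-- ===== PORT B =====

-- the 'while m % 2 == 0' loop of Source B; the 'm ≠ 0' guard is only for
-- totality (at m = 0 the Python loop never terminates, which Pre_ excludes)
def pvLow (m half : Int) : Int :=
  if h : m % 2 = 0 ∧ m ≠ 0 then pvLow (PySem.Int.floordiv m 2) (half * 2) else half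
termination_by m.natAbs
decreasing_by
  have hfm := PySem.Int.floordiv_mul_add_mod m 2
  have h2 : PySem.Int.mod m 2 = m % 2 := PySem.Int.mod_eq_emod_of_pos (by norm_num)
  omega

def pvNext (num : Int) : Int :=
  if num % 2 = 0 then num + 1
  else num + pvLow (PySem.Int.floordiv (num + 1) 2) 1

def solution_alt (numbers : List Int) : List Int :=
  numbers.map (fun num => pvNext num)

-- ===== PRECONDITION & SPEC =====
-- Pre_ excludes lists containing a negative odd element: negative input is outside
-- the problem's natural domain, and A's value there is an accident of bin()-string
-- slicing which B's arithmetic does not reproduce (B returns another value or loops).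
def Pre_solution (numbers : List Int) : Prop := ∀ x ∈ numbers, 0 ≤ x ∨ x % 2 = 0
instance (numbers : List Int) : Decidable (Pre_solution numbers) := by unfold Pre_solution; infer_instance

def pvWitness_solution : List Int := [0, 1, 2, 3, 7, -4, 2147483647]

def Spec_solution (numbers : List Int) (out : List Int) : Prop := out = solution_alt numbers
instance (numbers : List Int) (out : List Int) : Decidable (Spec_solution numbers out) := by unfold Spec_solution; infer_instance

-- ===== CLAIM (what is proved, stated in full; the proofs are below) =====
def Claim_equal_solution : Prop := ∀ (numbers : List Int), Dom_solution numbers → Pre_solution numbers → Spec_solution numbers (solution numbers)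

-- ===== LEMMAS AND PROOFS =====

-- list index helpers
theorem pv_getD_append (xs l : List Char) (k : Nat) (d : Char) :
    (xs ++ l).getD (xs.length + k) d = l.getD k d := by
  induction xs with
  | nil => simp
  | cons a t ih => simpa [Nat.succ_add] using ih

theorem pv_set_append (xs l : List Char) (k : Nat) (c : Char) :
    (xs ++ l).set (xs.length + k) c = xs ++ l.set k c := by
  induction xs with
  | nil => simp
  | cons a t ih => simpa [Nat.succ_add] using ih

-- the scan finds the last '0' (every char right of it being '1'), sets it to '1'
-- and the char after it (if any) to '0'
theorem pv_scan_spec (ys : List Char) :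
    ∀ zs xs : List Char, (∀ c ∈ ys, c = '1') →
      pvScan (xs ++ '0' :: (ys ++ zs)) (xs.length + 1 + ys.length)
        = xs ++ '1' :: (ys ++ zs).set 0 '0' := by
  induction ys using List.reverseRecOn with
  | nil =>
    intro zs xs _
    show pvScan (xs ++ '0' :: zs) (xs.length + 1) = _
    rw [pvScan]
    have hget : (xs ++ '0' :: zs).getD xs.length ' ' = '0' := by
      simpa using pv_getD_append xs ('0' :: zs) 0 ' '
    rw [if_pos hget]
    have hset : (xs ++ '0' :: zs).set xs.length '1' = xs ++ '1' :: zs := by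
      simpa using pv_set_append xs ('0' :: zs) 0 '1'
    simp only [hset]
    cases zs with
    | nil => simp
    | cons z t =>
      have hlt : xs.length + 1 < (xs ++ '1' :: z :: t).length := by simp
      rw [if_pos hlt]
      simpa using pv_set_append xs ('1' :: z :: t) 1 '0'
  | append_singleton ys' y ih =>
    intro zs xs hys
    have hy : y = '1' := hys y (by simp)
    subst hy
    have hchars : ∀ c ∈ ys', c = '1' := fun c hc => hys c (by simp [hc])
    have e1 : xs ++ '0' :: ((ys' ++ ['1']) ++ zs) = xs ++ '0' :: (ys' ++ ('1' :: zs)) := by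
      simp
    have e2 : xs.length + 1 + (ys' ++ ['1']).length = (xs.length + 1 + ys'.length) + 1 := by
      simp; omega
    rw [e1, e2, pvScan]
    have hget : (xs ++ '0' :: (ys' ++ ('1' :: zs))).getD (xs.length + 1 + ys'.length) ' ' = '1' := by
      have := pv_getD_append (xs ++ '0' :: ys') ('1' :: zs) 0 ' '
      simpa [List.append_assoc, Nat.add_assoc, Nat.add_comm, Nat.add_left_comm] using this
    rw [if_neg (by simp only [List.getD_eq_getElem?_getD] at hget; simp [hget])]
    have := ih ('1' :: zs) xs hchars
    rw [this]
    simp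

-- value of the fold with a generalized accumulator
theorem pv_iob_acc (cs : List Char) : ∀ a : Int,
    cs.foldl (fun acc c => 2 * acc + (if c = '1' then 1 else 0)) a
      = a * 2 ^ cs.length + pvIntOfBin cs := by
  induction cs with
  | nil => intro a; simp [pvIntOfBin]
  | cons c t ih =>
    intro a
    have h1 := ih (2 * a + (if c = '1' then 1 else 0))
    have h2 := ih (2 * 0 + (if c = '1' then 1 else 0))
    simp only [pvIntOfBin, List.foldl_cons] at *
    rw [h1, h2, List.length_cons, pow_succ]; ring

theorem pv_iob_append (xs l : List Char) :
    pvIntOfBin (xs ++ l) = pvIntOfBin xs * 2 ^ l.length + pvIntOfBin l := by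
  simpa [pvIntOfBin, List.foldl_append] using pv_iob_acc l (pvIntOfBin xs)

theorem pv_iob_cons (c : Char) (l : List Char) :
    pvIntOfBin (c :: l) = (if c = '1' then 1 else 0) * 2 ^ l.length + pvIntOfBin l := by
  have := pv_iob_acc l ((2 : Int) * 0 + (if c = '1' then 1 else 0))
  simp only [pvIntOfBin, List.foldl_cons] at *
  rw [this]; ring_nf

theorem pv_iob_natBits (n : Nat) : pvIntOfBin (pvNatBits n) = (n : Int) := by
  induction n using Nat.strong_induction_on with
  | _ n ih =>
    match n with
    | 0 => simp [pvNatBits, pvIntOfBin]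
    | m + 1 =>
      rw [pvNatBits, pv_iob_append, ih ((m + 1) / 2) (Nat.div_lt_self (Nat.succ_pos m) (by norm_num))]
      have h2 : ((m + 1) / 2 : Nat) * 2 + (m + 1) % 2 = m + 1 := by omega
      rcases Nat.mod_two_eq_zero_or_one (m + 1) with h | h <;>
        simp [pvIntOfBin, h] <;> push_cast <;> omega

theorem pv_iob_rep_one (k : Nat) : pvIntOfBin (List.replicate k '1') = 2 ^ k - 1 := by
  induction k with
  | zero => simp [pvIntOfBin]
  | succ k ih =>
    rw [List.replicate_succ, pv_iob_cons, ih]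
    simp [pow_succ]; ring

-- structure of the binary digits of q*2^(k+1) + (2^k - 1), k ≥ 1
theorem pv_bits_even (m : Nat) (hm : 0 < m) : pvNatBits (2 * m) = pvNatBits m ++ ['0'] := by
  match m, hm with
  | m + 1, _ =>
    have h : 2 * (m + 1) = (2 * (m + 1) - 1) + 1 := by omega
    rw [h, pvNatBits]
    have h1 : ((2 * (m + 1) - 1) + 1) / 2 = m + 1 := by omega
    have h2 : ((2 * (m + 1) - 1) + 1) % 2 = 0 := by omega
    rw [h1, h2]; simp

theorem pv_bits_odd (m : Nat) : pvNatBits (2 * m + 1) = pvNatBits m ++ ['1'] := by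
  rw [pvNatBits]
  have h1 : (2 * m + 1) / 2 = m := by omega
  have h2 : (2 * m + 1) % 2 = 1 := by omega
  rw [h1, h2]; simp

theorem pv_bits_rep (k : Nat) : pvNatBits (2 ^ (k + 1) - 1) = List.replicate (k + 1) '1' := by
  induction k with
  | zero => simp [pvNatBits]
  | succ k ih =>
    have h : 2 ^ (k + 2) - 1 = 2 * (2 ^ (k + 1) - 1) + 1 := by
      have e1 : 2 ≤ (2 : Nat) ^ (k + 1) := Nat.one_lt_two_pow_iff.mpr (by omega)
      have e2 : (2 : Nat) ^ (k + 2) = 2 * 2 ^ (k + 1) := by ring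
      rw [e2]; omega
    rw [h, pv_bits_odd, ih, ← List.replicate_succ']

theorem pv_bits_decomp (k q : Nat) (hq : 0 < q) :
    pvNatBits (q * 2 ^ (k + 2) + (2 ^ (k + 1) - 1))
      = pvNatBits q ++ '0' :: List.replicate (k + 1) '1' := by
  induction k with
  | zero =>
    have h : q * 2 ^ 2 + (2 ^ 1 - 1) = 2 * (2 * q) + 1 := by
      have e3 : 1 ≤ (2 : Nat) ^ 1 := Nat.one_le_two_pow
      zify [e3]; ring
    rw [h, pv_bits_odd, pv_bits_even q hq]; simp
  | succ k ih =>
    have h : q * 2 ^ (k + 3) + (2 ^ (k + 2) - 1)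
        = 2 * (q * 2 ^ (k + 2) + (2 ^ (k + 1) - 1)) + 1 := by
      have e3 : 1 ≤ (2 : Nat) ^ (k + 1) := Nat.one_le_two_pow
      have e4 : 1 ≤ (2 : Nat) ^ (k + 2) := Nat.one_le_two_pow
      zify [e3, e4]; ring
    rw [h, pv_bits_odd, ih]
    simp only [List.cons_append, List.append_assoc, ← List.replicate_succ']

-- every odd Nat is q * 2^(j+2) + (2^(j+1) - 1)
theorem pv_odd_decomp (n : Nat) (hn : n % 2 = 1) :
    ∃ q j : Nat, n = q * 2 ^ (j + 2) + (2 ^ (j + 1) - 1) := by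
  induction n using Nat.strong_induction_on with
  | _ n ih =>
    rcases Nat.lt_or_ge (n % 4) 3 with h4 | h4
    · refine ⟨n / 4, 0, ?_⟩
      have h1 : n % 4 = 1 := by omega
      have e1 : (2 : Nat) ^ 2 = 4 := by norm_num
      have e2 : (2 : Nat) ^ 1 = 2 := by norm_num
      rw [e1, e2]; omega
    · have h4 : n % 4 = 3 := by omega
      have hmid : (n / 2) % 2 = 1 := by omega
      have hlt : n / 2 < n := Nat.div_lt_self (by omega) (by norm_num)
      obtain ⟨q, j, hqj⟩ := ih (n / 2) hlt hmid
      refine ⟨q, j + 1, ?_⟩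
      have hn2 : n = 2 * (n / 2) + 1 := by omega
      rw [hn2, hqj]
      have e3 : 1 ≤ (2 : Nat) ^ (j + 1) := Nat.one_le_two_pow
      have e4 : 1 ≤ (2 : Nat) ^ (j + 2) := Nat.one_le_two_pow
      zify [e3, e4]; ring

-- B side: the halving loop isolates the power-of-two factor
theorem pv_low_spec (j : Nat) : ∀ m half : Int, m % 2 = 1 → 0 < m →
    pvLow (m * 2 ^ j) half = half * 2 ^ j := by
  induction j with
  | zero =>
    intro m half hm _
    rw [show m * 2 ^ 0 = m by ring, pvLow, dif_neg (by rintro ⟨h1, _⟩; omega)]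
    simp
  | succ j ih =>
    intro m half hm hpos
    have hpos2 : (0 : Int) < m * 2 ^ (j + 1) := by positivity
    have hmod : m * 2 ^ (j + 1) % 2 = 0 := by
      have e : m * 2 ^ (j + 1) = m * 2 ^ j * 2 := by ring
      rw [e]; exact Int.mul_emod_left _ 2
    rw [pvLow, dif_pos ⟨hmod, hpos2.ne'⟩]
    have hdiv : PySem.Int.floordiv (m * 2 ^ (j + 1)) 2 = m * 2 ^ j := by
      rw [PySem.Int.floordiv_eq_ediv_of_pos (by norm_num)]
      have e : m * 2 ^ (j + 1) = m * 2 ^ j * 2 := by ring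
      rw [e]
      exact Int.mul_ediv_cancel _ (by norm_num)
    rw [hdiv, ih m (half * 2) hm hpos]
    ring

-- the whole odd branch of A, for n = q*2^(j+2) + 2^(j+1) - 1
theorem pv_A_odd (q j : Nat) :
    pvIntOfBin
        (pvScan ('0' :: pvBinTail ((q * 2 ^ (j + 2) + (2 ^ (j + 1) - 1) : Nat) : Int))
          ('0' :: pvBinTail ((q * 2 ^ (j + 2) + (2 ^ (j + 1) - 1) : Nat) : Int)).length)
      = ((q * 2 ^ (j + 2) + (2 ^ (j + 1) - 1) : Nat) : Int) + 2 ^ j := by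
  set n : Nat := q * 2 ^ (j + 2) + (2 ^ (j + 1) - 1) with hne
  have hn1 : 1 ≤ (2 : Nat) ^ (j + 1) := Nat.one_le_two_pow
  have hnpos : 0 < n := by
    have h2 : 2 ≤ (2 : Nat) ^ (j + 1) := Nat.one_lt_two_pow_iff.mpr (by omega)
    omega
  have hnat : ((n : Int)).natAbs = n := by simp
  have htail : pvBinTail (n : Int) = pvNatBits n := by
    unfold pvBinTail
    rw [if_neg (by omega), hnat, if_neg (by omega)]
    rfl
  rcases Nat.eq_zero_or_pos q with hq | hq
  · -- n = 2^(j+1) - 1 : the prepended '0' is the one that flips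
    have hbits : pvNatBits n = List.replicate (j + 1) '1' := by
      rw [hne, hq]; simpa using pv_bits_rep j
    have hlist : '0' :: pvBinTail (n : Int)
        = [] ++ '0' :: (List.replicate (j + 1) '1' ++ []) := by
      simp [htail, hbits]
    have hlen : ('0' :: pvBinTail (n : Int)).length
        = ([] : List Char).length + 1 + (List.replicate (j + 1) '1').length := by
      simp [htail, hbits]
      try omega
    rw [hlen, hlist, pv_scan_spec _ _ _ (fun c hc => by simpa using hc)]
    rw [List.append_nil, List.replicate_succ]
    simp only [List.set_cons_zero, List.nil_append]
    rw [pv_iob_cons, pv_iob_cons, pv_iob_rep_one]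
    have hcast : ((n : Int)) = 2 ^ (j + 1) - 1 := by
      rw [hne, hq]; push_cast [hn1]; simp
    rw [hcast]
    simp [pow_succ]; ring
  · -- q > 0 : the flipped '0' lies inside the digits of n
    have hbits : pvNatBits n = pvNatBits q ++ '0' :: List.replicate (j + 1) '1' := by
      rw [hne]; exact pv_bits_decomp j q hq
    have hlist : '0' :: pvBinTail (n : Int)
        = ('0' :: pvNatBits q) ++ '0' :: (List.replicate (j + 1) '1' ++ []) := by
      simp [htail, hbits]
    have hlen : ('0' :: pvBinTail (n : Int)).length
        = ('0' :: pvNatBits q).length + 1 + (List.replicate (j + 1) '1').length := by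
      simp [htail, hbits]
      try omega
    rw [hlen, hlist, pv_scan_spec _ _ _ (fun c hc => by simpa using hc)]
    rw [List.append_nil, List.replicate_succ]
    simp only [List.set_cons_zero]
    rw [pv_iob_append, pv_iob_cons, pv_iob_cons, pv_iob_cons, pv_iob_rep_one, pv_iob_natBits]
    have hcast : ((n : Int)) = (q : Int) * 2 ^ (j + 2) + (2 ^ (j + 1) - 1) := by
      rw [hne]; push_cast [hn1]; ring
    rw [hcast]
    simp [pow_succ]; ring

-- per-element agreement on the admitted inputs
theorem pv_next_eq (num : Int) (h : 0 ≤ num ∨ num % 2 = 0) :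
    (if num % 2 = 0 then num + 1
     else
       let binNum := '0' :: pvBinTail num
       let binNum := pvScan binNum binNum.length
       pvIntOfBin binNum) = pvNext num := by
  rcases Int.emod_two_eq_zero_or_one num with he | ho
  · simp [pvNext, he]
  · have hge : 0 ≤ num := by rcases h with h | h; exact h; omega
    have hn : num = ((num.toNat : Int)) := by omega
    have hmod : num.toNat % 2 = 1 := by omega
    obtain ⟨q, j, hqj⟩ := pv_odd_decomp num.toNat hmod
    rw [if_neg (by omega)]
    show pvIntOfBin (pvScan ('0' :: pvBinTail num) ('0' :: pvBinTail num).length) = pvNext num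
    simp only [pvNext]
    rw [if_neg (by omega : ¬ num % 2 = 0)]
    rw [hn, hqj, pv_A_odd q j]
    -- B side
    have h1 : 1 ≤ (2 : Nat) ^ (j + 1) := Nat.one_le_two_pow
    have hm : ((q * 2 ^ (j + 2) + (2 ^ (j + 1) - 1) : Nat) : Int) + 1
        = (2 * (q : Int) + 1) * 2 ^ (j + 1) := by push_cast [h1]; ring
    have hhalf : PySem.Int.floordiv (((q * 2 ^ (j + 2) + (2 ^ (j + 1) - 1) : Nat) : Int) + 1) 2
        = (2 * (q : Int) + 1) * 2 ^ j := by
      rw [hm, PySem.Int.floordiv_eq_ediv_of_pos (by norm_num)]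
      have e : (2 * (q : Int) + 1) * 2 ^ (j + 1) = (2 * (q : Int) + 1) * 2 ^ j * 2 := by ring
      rw [e]
      exact Int.mul_ediv_cancel _ (by norm_num)
    rw [hhalf, pv_low_spec j (2 * (q : Int) + 1) 1 (by omega) (by positivity)]
    ring

-- A's fold with appends equals an accumulator-free map
theorem pv_solution_foldl (l : List Int) : ∀ acc : List Int,
    l.foldl
      (fun answer num =>
        if num % 2 = 0 then answer ++ [num + 1]
        else
          let binNum := '0' :: pvBinTail num
          let binNum := pvScan binNum binNum.length
          answer ++ [pvIntOfBin binNum]) acc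
      = acc ++ l.map (fun num =>
          if num % 2 = 0 then num + 1
          else
            let binNum := '0' :: pvBinTail num
            let binNum := pvScan binNum binNum.length
            pvIntOfBin binNum) := by
  induction l with
  | nil => intro acc; simp
  | cons x t ih =>
    intro acc
    simp only [List.foldl_cons, List.map_cons]
    rcases Int.emod_two_eq_zero_or_one x with h | h
    · rw [if_pos h, if_pos h, ih]; simp
    · rw [if_neg (by omega), if_neg (by omega), ih]; simp

-- ===== VERDICT (by name: the statement is the Claim_ definition above) =====
theorem solution_spec : Claim_equal_solution := by
  intro numbers _ hpre
  unfold Spec_solution solution solution_alt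
  rw [pv_solution_foldl numbers []]
  simp only [List.nil_append]
  exact List.map_congr_left fun x hx => pv_next_eq x (hpre x hx)
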